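-- pv_equiv track=rewrite | github.com/ai-joon/defi-chatbot | src/utils/lucene_query.py | create_lucene_query
-- ===== SOURCE A (Python) =====
-- from typing import Literal, Union, List
--
-- def create_lucene_query(
--     terms: List[str], join_word: Literal["OR", "AND"], sub_query: bool = False
-- ) -> Union[str, None]:
--     if len(terms) == 0:
--         return None
--
--     escaped_terms = [
--         term.replace("+", "\\+")
--         .replace("-", "\\-")
--         .replace("&&", "\\&&")
--         .replace("||", "\\||")
--         .replace("!", "\\!")
--         .replace("(", "\\(")
--         .replace(")", "\\)")
--         .replace("{", "\\{")
--         .replace("}", "\\}")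
--         .replace("[", "\\[")
--         .replace("]", "\\]")
--         .replace("^", "\\^")
--         .replace('"', '\\"')
--         .replace("~", "\\~")
--         .replace("*", "\\*")
--         .replace("?", "\\?")
--         .replace(":", "\\:")
--         .replace("/", "\\/")
--         for term in terms
--     ]
--
--     if sub_query:
--         return f'({f" {join_word} ".join(escaped_terms)})'
--
--     return f" {join_word} ".join(escaped_terms)
-- ===== SOURCE B (Python) =====
-- from typing import Literal, Union, List
--
-- _SINGLES = set('+-!(){}[]^"~*?:/')
--
-- def _escape(term: str) -> str:
--     out = []
--     i = 0
--     n = len(term)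
--     while i < n:
--         c = term[i]
--         if i + 1 < n and c == term[i + 1] and c in ('&', '|'):
--             out.append('\\' + c + c)
--             i += 2
--         elif c in _SINGLES:
--             out.append('\\' + c)
--             i += 1
--         else:
--             out.append(c)
--             i += 1
--     return ''.join(out)
--
-- def create_lucene_query(terms, join_word, sub_query=False):
--     if len(terms) == 0:
--         return None
--     joined = (" %s " % join_word).join(_escape(t) for t in terms)
--     return "(%s)" % joined if sub_query else joined
-- ===== Notes on version B (the rewrite author's own statement) =====
-- stated objective: simpler
-- what changed: The 18 chained full-string .replace() passes per term are replaced by one left-to-right scan of each term that handles '&&'/'||' greedily and single specials via a membership test.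
import Mathlib
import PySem

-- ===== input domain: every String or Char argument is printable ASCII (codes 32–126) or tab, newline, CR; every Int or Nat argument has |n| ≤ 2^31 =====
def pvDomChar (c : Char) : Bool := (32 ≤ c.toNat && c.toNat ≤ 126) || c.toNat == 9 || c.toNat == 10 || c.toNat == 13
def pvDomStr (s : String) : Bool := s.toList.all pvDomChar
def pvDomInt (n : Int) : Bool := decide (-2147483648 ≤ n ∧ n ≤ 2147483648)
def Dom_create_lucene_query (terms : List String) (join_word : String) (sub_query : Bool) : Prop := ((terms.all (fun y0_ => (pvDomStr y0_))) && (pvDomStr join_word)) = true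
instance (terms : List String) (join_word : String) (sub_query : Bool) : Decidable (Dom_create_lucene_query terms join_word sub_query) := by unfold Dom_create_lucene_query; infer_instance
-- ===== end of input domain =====

-- B replaces A's 18 chained str.replace passes over each term by a single left-to-right scan (objective: simpler, one pass per term).

-- ===== PORT A =====
-- literal transliteration of A's chain of .replace calls
def pvEscA (term : String) : String :=
  let t := PySem.Str.replace term "+" "\\+"
  let t := PySem.Str.replace t "-" "\\-"
  let t := PySem.Str.replace t "&&" "\\&&"
  let t := PySem.Str.replace t "||" "\\||"
  let t := PySem.Str.replace t "!" "\\!"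
  let t := PySem.Str.replace t "(" "\\("
  let t := PySem.Str.replace t ")" "\\)"
  let t := PySem.Str.replace t "{" "\\{"
  let t := PySem.Str.replace t "}" "\\}"
  let t := PySem.Str.replace t "[" "\\["
  let t := PySem.Str.replace t "]" "\\]"
  let t := PySem.Str.replace t "^" "\\^"
  let t := PySem.Str.replace t "\"" "\\\""
  let t := PySem.Str.replace t "~" "\\~"
  let t := PySem.Str.replace t "*" "\\*"
  let t := PySem.Str.replace t "?" "\\?"
  let t := PySem.Str.replace t ":" "\\:"
  PySem.Str.replace t "/" "\\/"

def create_lucene_query (terms : List String) (join_word : String) (sub_query : Bool) : Option String :=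
  if terms.length = 0 then none
  else
    let escaped_terms := terms.map pvEscA
    let joined := PySem.Str.join (" " ++ join_word ++ " ") escaped_terms
    if sub_query then some ("(" ++ joined ++ ")") else some joined

-- ===== PORT B =====
-- the single-char specials, as in Source B's _SINGLES
def pvSingles : List Char := ['+', '-', '!', '(', ')', '{', '}', '[', ']', '^', '"', '~', '*', '?', ':', '/']

def pvEmitB (c : Char) : List Char := if c ∈ pvSingles then ['\\', c] else [c]

-- B's left-to-right scan: the two-char tokens '&&'/'||' first, then single specials
def pvEscBgo : List Char → List Char
  | [] => []
  | [c] => pvEmitB c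
  | c :: d :: t =>
    if c = d ∧ (c = '&' ∨ c = '|') then '\\' :: c :: d :: pvEscBgo t
    else pvEmitB c ++ pvEscBgo (d :: t)

def pvEscB (term : String) : String := String.ofList (pvEscBgo term.toList)

def create_lucene_query_alt (terms : List String) (join_word : String) (sub_query : Bool) : Option String :=
  if terms.length = 0 then none
  else
    let joined := PySem.Str.join (" " ++ join_word ++ " ") (terms.map pvEscB)
    if sub_query then some ("(" ++ joined ++ ")") else some joined

-- ===== PRECONDITION & SPEC =====
def Spec_create_lucene_query (terms : List String) (join_word : String) (sub_query : Bool) (out : Option String) : Prop := out = create_lucene_query_alt terms join_word sub_query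
instance (terms : List String) (join_word : String) (sub_query : Bool) (out : Option String) : Decidable (Spec_create_lucene_query terms join_word sub_query out) := by unfold Spec_create_lucene_query; infer_instance

-- ===== CLAIM (what is proved, stated in full; the proofs are below) =====
def Claim_equal_create_lucene_query : Prop := ∀ (terms : List String) (join_word : String) (sub_query : Bool), Dom_create_lucene_query terms join_word sub_query → Spec_create_lucene_query terms join_word sub_query (create_lucene_query terms join_word sub_query)

-- ===== LEMMAS AND PROOFS =====

-- the per-character effect of one single-char replace `.replace(c, '\' + c)`
def pvSingleF (c : Char) (x : Char) : List Char := if x = c then ['\\', c] else [x]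

-- membership form, for merged chains of single-char replaces
def pvFL (L : List Char) (x : Char) : List Char := if x ∈ L then ['\\', x] else [x]

-- the effect of one two-char replace `.replace(dd, '\' + dd)`
def pvRep2 (d : Char) : List Char → List Char
  | [] => []
  | [x] => [x]
  | x :: y :: t => if x = d ∧ y = d then '\\' :: d :: d :: pvRep2 d t else x :: pvRep2 d (y :: t)

theorem pvReplace_single_go (c : Char) :
    ∀ (l : List Char) (fuel : Nat) (acc : List Char), l.length ≤ fuel →
      PySem.Chars.replace.go [c] ['\\', c] fuel l acc = acc.reverse ++ l.flatMap (pvSingleF c) := by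
  intro l
  induction l with
  | nil =>
    intro fuel acc _
    cases fuel <;> simp [PySem.Chars.replace.go]
  | cons x t ih =>
    intro fuel acc hle
    cases fuel with
    | zero => simp at hle
    | succ fuel =>
      simp only [PySem.Chars.replace.go]
      by_cases hx : x = c
      · subst hx
        have hpre : List.isPrefixOf [x] (x :: t) = true := by simp [List.isPrefixOf]
        rw [if_pos hpre]
        have hd : List.drop [x].length (x :: t) = t := rfl
        rw [hd, ih fuel (['\\', x].reverse ++ acc) (by simp at hle ⊢; omega)]
        simp [pvSingleF]
      · have hpre : ¬ (List.isPrefixOf [c] (x :: t) = true) := by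
          simp [List.isPrefixOf]
          exact fun h => absurd h.symm hx
        rw [if_neg hpre]
        rw [ih fuel (x :: acc) (by simp at hle ⊢; omega)]
        simp [pvSingleF, hx]

theorem pvReplace_single (c : Char) (s : List Char) :
    PySem.Chars.replace s [c] ['\\', c] = s.flatMap (pvSingleF c) := by
  have h : PySem.Chars.replace s [c] ['\\', c] =
      PySem.Chars.replace.go [c] ['\\', c] s.length s [] := by
    simp [PySem.Chars.replace]
  rw [h, pvReplace_single_go c s s.length [] (le_refl _)]
  simp

theorem pvRep2_cons_ne (d x : Char) (r : List Char) (h : x ≠ d) :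
    pvRep2 d (x :: r) = x :: pvRep2 d r := by
  cases r with
  | nil => simp [pvRep2]
  | cons y t => simp [pvRep2, h]

theorem pvRep2_cons_head_ne (d x : Char) (r : List Char) (h : r.head? ≠ some d) :
    pvRep2 d (x :: r) = x :: pvRep2 d r := by
  cases r with
  | nil => simp [pvRep2]
  | cons y t =>
    have hy : y ≠ d := by
      intro hy
      exact h (by simp [hy])
    simp [pvRep2, hy]

theorem pvReplace_double_go (d : Char) :
    ∀ (fuel : Nat) (l acc : List Char), l.length ≤ fuel →
      PySem.Chars.replace.go [d, d] ['\\', d, d] fuel l acc = acc.reverse ++ pvRep2 d l := by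
  intro fuel
  induction fuel with
  | zero =>
    intro l acc hle
    have : l = [] := List.eq_nil_of_length_eq_zero (Nat.le_zero.mp hle)
    subst this
    simp [PySem.Chars.replace.go, pvRep2]
  | succ fuel ih =>
    intro l acc hle
    cases l with
    | nil => simp [PySem.Chars.replace.go, pvRep2]
    | cons x t =>
      simp only [PySem.Chars.replace.go]
      by_cases hpre : List.isPrefixOf [d, d] (x :: t) = true
      · rw [if_pos hpre]
        cases t with
        | nil => simp [List.isPrefixOf] at hpre
        | cons y t2 =>
          simp [List.isPrefixOf] at hpre
          obtain ⟨h1, h2⟩ := hpre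
          rw [← h1, ← h2]
          have hd : List.drop [d, d].length (d :: d :: t2) = t2 := rfl
          rw [hd, ih t2 (['\\', d, d].reverse ++ acc) (by simp at hle ⊢; omega)]
          simp [pvRep2]
      · rw [if_neg hpre]
        rw [ih t (x :: acc) (by simp at hle ⊢; omega)]
        have hstep : pvRep2 d (x :: t) = x :: pvRep2 d t := by
          cases t with
          | nil => simp [pvRep2]
          | cons y t2 =>
            have hne : ¬(x = d ∧ y = d) := by
              rintro ⟨h1, h2⟩
              subst h1
              subst h2
              simp [List.isPrefixOf] at hpre
            simp [pvRep2, hne]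
        rw [hstep]
        simp

theorem pvReplace_double (d : Char) (s : List Char) :
    PySem.Chars.replace s [d, d] ['\\', d, d] = pvRep2 d s := by
  have h : PySem.Chars.replace s [d, d] ['\\', d, d] =
      PySem.Chars.replace.go [d, d] ['\\', d, d] s.length s [] := by
    simp [PySem.Chars.replace]
  rw [h, pvReplace_double_go d s.length s [] (le_refl _)]
  simp

theorem pvSingleF_eq_fL (c : Char) : pvSingleF c = pvFL [c] := by
  funext x
  by_cases h : x = c
  · subst h
    simp [pvSingleF, pvFL]
  · simp [pvSingleF, pvFL, h]

-- merging two consecutive single-char passes over disjoint, backslash-free character sets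
theorem pvStep2 (L M : List Char) (hdisj : ∀ x ∈ M, x ∉ L) (hb : '\\' ∉ L) (s : List Char) :
    (s.flatMap (pvFL M)).flatMap (pvFL L) = s.flatMap (pvFL (M ++ L)) := by
  induction s with
  | nil => simp
  | cons x t ih =>
    simp only [List.flatMap_cons, List.flatMap_append, ih]
    congr 1
    by_cases hm : x ∈ M
    · have hl : x ∉ L := hdisj x hm
      simp [pvFL, hm, hb, hl]
    · by_cases hl : x ∈ L <;> simp [pvFL, hm, hl]

theorem pvStep2' (L M N : List Char) (hdisj : ∀ x ∈ M, x ∉ L) (hb : '\\' ∉ L) (hN : M ++ L = N) (s : List Char) :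
    (s.flatMap (pvFL M)).flatMap (pvFL L) = s.flatMap (pvFL N) := by
  rw [pvStep2 L M hdisj hb, hN]

-- the two merged groups of single-char passes in A's chain
def pvL12 : List Char := ['+', '-']
def pvL14 : List Char := ['!', '(', ')', '{', '}', '[', ']', '^', '"', '~', '*', '?', ':', '/']

theorem pvEmitB_eq (c : Char) (h1 : c ≠ '+') (h2 : c ≠ '-') : pvFL pvL14 c = pvEmitB c := by
  simp only [pvFL, pvEmitB, pvL14, pvSingles, List.mem_cons, List.not_mem_nil, or_false]
  simp [h1, h2]

theorem pvHead_flatMap_fL12 (d : Char) (t : List Char) :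
    (((d :: t).flatMap (pvFL pvL12)).head? = some '\\') ∨ (((d :: t).flatMap (pvFL pvL12)).head? = some d) := by
  by_cases hd : d ∈ pvL12 <;> simp [pvFL, hd]

theorem pvHead_rep2 (d : Char) (l : List Char) :
    (pvRep2 d l).head? = l.head? ∨ (pvRep2 d l).head? = some '\\' := by
  cases l with
  | nil => simp [pvRep2]
  | cons x t =>
    cases t with
    | nil => simp [pvRep2]
    | cons y t2 =>
      by_cases h : x = d ∧ y = d <;> simp [pvRep2, h]

-- the central equivalence: A's canonicalised chain equals B's single scan
theorem pvChain_eq_escB (s : List Char) :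
    ((pvRep2 '|' (pvRep2 '&' (s.flatMap (pvFL pvL12)))).flatMap (pvFL pvL14)) = pvEscBgo s := by
  induction s using pvEscBgo.induct with
  | case1 => simp [pvRep2, pvEscBgo]
  | case2 c =>
    by_cases h1 : c = '+'
    · subst h1; decide
    · by_cases h2 : c = '-'
      · subst h2; decide
      · have hfl : pvFL pvL12 c = [c] := by simp [pvFL, pvL12, h1, h2]
        simp only [List.flatMap_cons, List.flatMap_nil, List.append_nil, hfl]
        simp only [pvRep2, pvEscBgo]
        rw [← pvEmitB_eq c h1 h2]
        simp
  | case3 c d t hcd ih =>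
    obtain ⟨hcd', hor⟩ := hcd
    subst hcd'
    rcases hor with h | h
    · -- the '&&' token
      subst h
      have hfl : pvFL pvL12 '&' = ['&'] := by decide
      simp only [List.flatMap_cons, hfl, List.singleton_append]
      rw [show ∀ X : List Char, pvRep2 '&' ('&' :: '&' :: X) = '\\' :: '&' :: '&' :: pvRep2 '&' X
            from fun X => by simp [pvRep2]]
      rw [pvRep2_cons_ne '|' '\\' _ (by decide), pvRep2_cons_ne '|' '&' _ (by decide),
          pvRep2_cons_ne '|' '&' _ (by decide)]
      simp only [List.flatMap_cons]
      rw [show pvFL pvL14 '\\' = ['\\'] from by decide, show pvFL pvL14 '&' = ['&'] from by decide]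
      simp only [List.singleton_append]
      rw [ih]
      simp [pvEscBgo]
    · -- the '||' token
      subst h
      have hfl : pvFL pvL12 '|' = ['|'] := by decide
      simp only [List.flatMap_cons, hfl, List.singleton_append]
      rw [pvRep2_cons_ne '&' '|' _ (by decide), pvRep2_cons_ne '&' '|' _ (by decide)]
      rw [show ∀ X : List Char, pvRep2 '|' ('|' :: '|' :: X) = '\\' :: '|' :: '|' :: pvRep2 '|' X
            from fun X => by simp [pvRep2]]
      simp only [List.flatMap_cons]
      rw [show pvFL pvL14 '\\' = ['\\'] from by decide, show pvFL pvL14 '|' = ['|'] from by decide]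
      simp only [List.singleton_append]
      rw [ih]
      simp [pvEscBgo]
  | case4 c d t hne ih =>
    have hR : (((d :: t).flatMap (pvFL pvL12)).head? = some '\\') ∨
        (((d :: t).flatMap (pvFL pvL12)).head? = some d) := pvHead_flatMap_fL12 d t
    by_cases hc1 : c = '&'
    · -- lone '&' (next char is not '&')
      subst hc1
      have hd : d ≠ '&' := by
        intro hd
        exact hne ⟨hd.symm, Or.inl rfl⟩
      rw [List.flatMap_cons, show pvFL pvL12 '&' = ['&'] from by decide, List.singleton_append]
      rw [pvRep2_cons_head_ne '&' '&' _ (by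
        rcases hR with h | h <;> rw [h] <;> simp [hd])]
      rw [pvRep2_cons_ne '|' '&' _ (by decide)]
      rw [List.flatMap_cons, show pvFL pvL14 '&' = ['&'] from by decide, List.singleton_append]
      rw [ih]
      rw [show pvEscBgo ('&' :: d :: t) = pvEmitB '&' ++ pvEscBgo (d :: t) from by simp [pvEscBgo, Ne.symm hd]]
      rw [show pvEmitB '&' = ['&'] from by decide, List.singleton_append]
    · by_cases hc2 : c = '|'
      · -- lone '|' (next char is not '|')
        subst hc2
        have hd : d ≠ '|' := by
          intro hd
          exact hne ⟨hd.symm, Or.inr rfl⟩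
        rw [List.flatMap_cons, show pvFL pvL12 '|' = ['|'] from by decide, List.singleton_append]
        rw [pvRep2_cons_ne '&' '|' _ (by decide)]
        rw [pvRep2_cons_head_ne '|' '|' _ (by
          rcases pvHead_rep2 '&' ((d :: t).flatMap (pvFL pvL12)) with h | h
          · rw [h]
            rcases hR with h2 | h2 <;> rw [h2] <;> simp [hd]
          · rw [h]; simp)]
        rw [List.flatMap_cons, show pvFL pvL14 '|' = ['|'] from by decide, List.singleton_append]
        rw [ih]
        rw [show pvEscBgo ('|' :: d :: t) = pvEmitB '|' ++ pvEscBgo (d :: t) from by simp [pvEscBgo, Ne.symm hd]]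
        rw [show pvEmitB '|' = ['|'] from by decide, List.singleton_append]
      · by_cases hc3 : c = '+'
        · subst hc3
          rw [List.flatMap_cons, show pvFL pvL12 '+' = ['\\', '+'] from by decide,
              List.cons_append, List.singleton_append]
          rw [pvRep2_cons_ne '&' '\\' _ (by decide), pvRep2_cons_ne '&' '+' _ (by decide)]
          rw [pvRep2_cons_ne '|' '\\' _ (by decide), pvRep2_cons_ne '|' '+' _ (by decide)]
          rw [List.flatMap_cons, show pvFL pvL14 '\\' = ['\\'] from by decide, List.singleton_append]
          rw [List.flatMap_cons, show pvFL pvL14 '+' = ['+'] from by decide, List.singleton_append]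
          rw [ih]
          rw [show pvEscBgo ('+' :: d :: t) = pvEmitB '+' ++ pvEscBgo (d :: t) from by simp [pvEscBgo]]
          rw [show pvEmitB '+' = ['\\', '+'] from by decide, List.cons_append, List.singleton_append]
        · by_cases hc4 : c = '-'
          · subst hc4
            rw [List.flatMap_cons, show pvFL pvL12 '-' = ['\\', '-'] from by decide,
                List.cons_append, List.singleton_append]
            rw [pvRep2_cons_ne '&' '\\' _ (by decide), pvRep2_cons_ne '&' '-' _ (by decide)]
            rw [pvRep2_cons_ne '|' '\\' _ (by decide), pvRep2_cons_ne '|' '-' _ (by decide)]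
            rw [List.flatMap_cons, show pvFL pvL14 '\\' = ['\\'] from by decide, List.singleton_append]
            rw [List.flatMap_cons, show pvFL pvL14 '-' = ['-'] from by decide, List.singleton_append]
            rw [ih]
            rw [show pvEscBgo ('-' :: d :: t) = pvEmitB '-' ++ pvEscBgo (d :: t) from by simp [pvEscBgo]]
            rw [show pvEmitB '-' = ['\\', '-'] from by decide, List.cons_append, List.singleton_append]
          · -- an ordinary character
            have hfl : pvFL pvL12 c = [c] := by simp [pvFL, pvL12, hc3, hc4]
            rw [List.flatMap_cons, hfl, List.singleton_append]
            rw [pvRep2_cons_ne '&' c _ hc1, pvRep2_cons_ne '|' c _ hc2]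
            rw [List.flatMap_cons, pvEmitB_eq c hc3 hc4]
            rw [ih]
            rw [show pvEscBgo (c :: d :: t) = pvEmitB c ++ pvEscBgo (d :: t) from by simp [pvEscBgo, hne]]

-- bridge: A's escaped term equals B's escaped term, as lists of characters
theorem pvEscA_toList (term : String) :
    (pvEscA term).toList = pvEscBgo term.toList := by
  have h14 : ∀ Y : List Char,
      ((((((((((((((Y.flatMap (pvFL ['!'])).flatMap (pvFL ['('])).flatMap
        (pvFL [')'])).flatMap (pvFL ['{'])).flatMap (pvFL ['}'])).flatMap
        (pvFL ['['])).flatMap (pvFL [']'])).flatMap (pvFL ['^'])).flatMap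
        (pvFL ['"'])).flatMap (pvFL ['~'])).flatMap (pvFL ['*'])).flatMap
        (pvFL ['?'])).flatMap (pvFL [':'])).flatMap (pvFL ['/'])) = Y.flatMap (pvFL pvL14) := by
    intro Y
    rw [pvStep2' ['('] ['!'] ['!', '('] (by simp) (by decide) rfl]
    rw [pvStep2' [')'] ['!', '('] ['!', '(', ')'] (by simp) (by decide) rfl]
    rw [pvStep2' ['{'] ['!', '(', ')'] ['!', '(', ')', '{'] (by simp) (by decide) rfl]
    rw [pvStep2' ['}'] ['!', '(', ')', '{'] ['!', '(', ')', '{', '}'] (by simp) (by decide) rfl]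
    rw [pvStep2' ['['] ['!', '(', ')', '{', '}'] ['!', '(', ')', '{', '}', '['] (by simp) (by decide) rfl]
    rw [pvStep2' [']'] ['!', '(', ')', '{', '}', '['] ['!', '(', ')', '{', '}', '[', ']'] (by simp) (by decide) rfl]
    rw [pvStep2' ['^'] ['!', '(', ')', '{', '}', '[', ']'] ['!', '(', ')', '{', '}', '[', ']', '^'] (by simp) (by decide) rfl]
    rw [pvStep2' ['"'] ['!', '(', ')', '{', '}', '[', ']', '^'] ['!', '(', ')', '{', '}', '[', ']', '^', '"'] (by simp) (by decide) rfl]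
    rw [pvStep2' ['~'] ['!', '(', ')', '{', '}', '[', ']', '^', '"'] ['!', '(', ')', '{', '}', '[', ']', '^', '"', '~'] (by simp) (by decide) rfl]
    rw [pvStep2' ['*'] ['!', '(', ')', '{', '}', '[', ']', '^', '"', '~'] ['!', '(', ')', '{', '}', '[', ']', '^', '"', '~', '*'] (by simp) (by decide) rfl]
    rw [pvStep2' ['?'] ['!', '(', ')', '{', '}', '[', ']', '^', '"', '~', '*'] ['!', '(', ')', '{', '}', '[', ']', '^', '"', '~', '*', '?'] (by simp) (by decide) rfl]
    rw [pvStep2' [':'] ['!', '(', ')', '{', '}', '[', ']', '^', '"', '~', '*', '?'] ['!', '(', ')', '{', '}', '[', ']', '^', '"', '~', '*', '?', ':'] (by simp) (by decide) rfl]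
    rw [pvStep2' ['/'] ['!', '(', ')', '{', '}', '[', ']', '^', '"', '~', '*', '?', ':'] pvL14 (by simp) (by decide) (by decide)]
  have h12 : ∀ Y : List Char,
      (Y.flatMap (pvFL ['+'])).flatMap (pvFL ['-']) = Y.flatMap (pvFL pvL12) := by
    intro Y
    rw [pvStep2' ['-'] ['+'] pvL12 (by simp) (by decide) (by decide)]
  simp only [pvEscA, PySem.Str.toList_replace]
  rw [show ("+" : String).toList = ['+'] from rfl, show ("\\+" : String).toList = ['\\', '+'] from rfl,
      show ("-" : String).toList = ['-'] from rfl, show ("\\-" : String).toList = ['\\', '-'] from rfl,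
      show ("&&" : String).toList = ['&', '&'] from rfl, show ("\\&&" : String).toList = ['\\', '&', '&'] from rfl,
      show ("||" : String).toList = ['|', '|'] from rfl, show ("\\||" : String).toList = ['\\', '|', '|'] from rfl,
      show ("!" : String).toList = ['!'] from rfl, show ("\\!" : String).toList = ['\\', '!'] from rfl,
      show ("(" : String).toList = ['('] from rfl, show ("\\(" : String).toList = ['\\', '('] from rfl,
      show (")" : String).toList = [')'] from rfl, show ("\\)" : String).toList = ['\\', ')'] from rfl,
      show ("{" : String).toList = ['{'] from rfl, show ("\\{" : String).toList = ['\\', '{'] from rfl,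
      show ("}" : String).toList = ['}'] from rfl, show ("\\}" : String).toList = ['\\', '}'] from rfl,
      show ("[" : String).toList = ['['] from rfl, show ("\\[" : String).toList = ['\\', '['] from rfl,
      show ("]" : String).toList = [']'] from rfl, show ("\\]" : String).toList = ['\\', ']'] from rfl,
      show ("^" : String).toList = ['^'] from rfl, show ("\\^" : String).toList = ['\\', '^'] from rfl,
      show ("\"" : String).toList = ['"'] from rfl, show ("\\\"" : String).toList = ['\\', '"'] from rfl,
      show ("~" : String).toList = ['~'] from rfl, show ("\\~" : String).toList = ['\\', '~'] from rfl,
      show ("*" : String).toList = ['*'] from rfl, show ("\\*" : String).toList = ['\\', '*'] from rfl,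
      show ("?" : String).toList = ['?'] from rfl, show ("\\?" : String).toList = ['\\', '?'] from rfl,
      show (":" : String).toList = [':'] from rfl, show ("\\:" : String).toList = ['\\', ':'] from rfl,
      show ("/" : String).toList = ['/'] from rfl, show ("\\/" : String).toList = ['\\', '/'] from rfl]
  simp only [pvReplace_single, pvReplace_double, pvSingleF_eq_fL]
  rw [h12, h14]
  exact pvChain_eq_escB term.toList

theorem pvEscA_eq : pvEscA = pvEscB := by
  funext term
  apply String.toList_inj.mp
  rw [pvEscA_toList]
  simp [pvEscB]

-- ===== VERDICT (by name: the statement is the Claim_ definition above) =====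
theorem create_lucene_query_spec : Claim_equal_create_lucene_query := by
  intro terms join_word sub_query _
  unfold Spec_create_lucene_query create_lucene_query create_lucene_query_alt
  rw [pvEscA_eq]
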